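-- pv_equiv track=rewrite | github.com/cedmenezes/connect4 | connect4.py | gereSucessores
-- ===== SOURCE A (Python) =====
-- from copy import deepcopy
--
-- def primeiraLinhaLivre(coluna, mat):
--     return livre(len(mat)-1, coluna, mat)
--
-- def livre(linha, coluna, mat):
--     if linha<0: return -1
--     if mat[linha][coluna] == ' ': return linha
--     return livre(linha-1, coluna, mat)
--
-- def gereSucessores(inicio, vez):
--     suc = []
--     for i in range(len(inicio[0])):
--         linha = primeiraLinhaLivre(i, inicio)
--         if linha >= 0:
--             novaMat = deepcopy(inicio)
--             novaMat[linha][i] = vez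
--             suc.append(novaMat)
--         else:
--             suc.append(None)
--     return suc
-- ===== SOURCE B (Python) =====
-- def gereSucessores(inicio, vez):
--     # B: per column, extract the column, find the bottom-most free row via
--     # reversed-list .index instead of A's recursive scan; successor built by
--     # row-wise copy instead of deepcopy.
--     n = len(inicio)
--     suc = []
--     for i in range(len(inicio[0])):
--         col = [row[i] for row in inicio]
--         if ' ' in col:
--             linha = n - 1 - col[::-1].index(' ')
--             nova = [row[:] for row in inicio]
--             nova[linha][i] = vez
--             suc.append(nova)
--         else:
--             suc.append(None)
--     return suc
-- ===== Notes on version B (the rewrite author's own statement) =====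
-- stated objective: alternative
-- what changed: A finds the free row by a per-column recursive bottom-up scan and copies with deepcopy; B extracts each column as a list, locates the bottom-most blank via membership plus reversed-list .index, and builds the successor with a row-wise copy.
import Mathlib
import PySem

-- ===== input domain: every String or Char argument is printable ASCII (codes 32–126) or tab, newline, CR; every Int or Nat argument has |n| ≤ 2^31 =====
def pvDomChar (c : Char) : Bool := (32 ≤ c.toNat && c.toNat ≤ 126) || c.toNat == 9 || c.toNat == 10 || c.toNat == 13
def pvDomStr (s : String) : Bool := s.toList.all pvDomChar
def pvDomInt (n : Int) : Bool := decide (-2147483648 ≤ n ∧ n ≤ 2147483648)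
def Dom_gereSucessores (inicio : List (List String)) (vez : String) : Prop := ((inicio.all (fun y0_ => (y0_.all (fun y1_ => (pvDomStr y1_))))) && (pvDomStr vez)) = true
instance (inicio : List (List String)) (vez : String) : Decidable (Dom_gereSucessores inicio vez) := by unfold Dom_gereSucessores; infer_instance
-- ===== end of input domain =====

-- B replaces A's recursive per-column free-row search by column extraction plus reversed-list
-- .index, and deepcopy by a row-wise copy (alternative decomposition; return value only).

-- ===== PORT A =====
def livre (linha coluna : Int) (mat : List (List String)) : Int :=
  if linha < 0 then -1
  else if PySem.List.pyGetD (PySem.List.pyGetD mat linha []) coluna "" = " " then linha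
  else livre (linha - 1) coluna mat
termination_by (linha + 1).toNat
decreasing_by omega

def primeiraLinhaLivre (coluna : Int) (mat : List (List String)) : Int :=
  livre ((mat.length : Int) - 1) coluna mat

def gereSucessores (inicio : List (List String)) (vez : String) : List (Option (List (List String))) :=
  (PySem.List.pyRange 0 ((PySem.List.pyGetD inicio 0 ([] : List String)).length : Int) 1).foldl
    (fun suc i =>
      let linha := primeiraLinhaLivre i inicio
      if linha ≥ 0 then
        -- novaMat = deepcopy(inicio); novaMat[linha][i] = vez  (indices in range under Pre_)
        suc ++ [some (PySem.List.pySetD inicio linha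
                (PySem.List.pySetD (PySem.List.pyGetD inicio linha []) i vez))]
      else suc ++ [none]) []

-- ===== PORT B =====
def gereSucessores_alt (inicio : List (List String)) (vez : String) : List (Option (List (List String))) :=
  let n : Int := inicio.length
  (PySem.List.pyRange 0 ((PySem.List.pyGetD inicio 0 ([] : List String)).length : Int) 1).foldl
    (fun suc i =>
      let col := inicio.map (fun row => PySem.List.pyGetD row i "")
      if " " ∈ col then
        -- linha = n - 1 - col[::-1].index(' ')  (.index cannot fail under the membership guard)
        let linha := n - 1 -
          ((PySem.List.index? ((PySem.List.slice? col none none (-1)).getD []) " ").getD 0 : Int)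
        -- nova = [row[:] for row in inicio]; nova[linha][i] = vez
        let nova := inicio.map (fun row => PySem.List.slice row none none)
        suc ++ [some (PySem.List.pySetD nova linha
                (PySem.List.pySetD (PySem.List.pyGetD nova linha []) i vez))]
      else suc ++ [none]) []

-- ===== PRECONDITION & SPEC =====
-- Pre_ excludes the empty board (inicio[0] raises IndexError in A) and boards with a row
-- shorter than the first row, on which the column accesses of A (and of B) can raise
-- IndexError; on a few such ragged boards A happens to return because its bottom-up scan
-- stops before reaching the short row, while B's column extraction raises — see cites.
def Pre_gereSucessores (inicio : List (List String)) (vez : String) : Prop :=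
  inicio ≠ [] ∧ ∀ row ∈ inicio, (inicio.headD []).length ≤ row.length
instance (inicio : List (List String)) (vez : String) : Decidable (Pre_gereSucessores inicio vez) := by unfold Pre_gereSucessores; infer_instance

def pvWitness_gereSucessores : List (List String) × String :=
  ([[" ", "X"], ["O", " "]], "O")

def Spec_gereSucessores (inicio : List (List String)) (vez : String) (out : List (Option (List (List String)))) : Prop := out = gereSucessores_alt inicio vez
instance (inicio : List (List String)) (vez : String) (out : List (Option (List (List String)))) : Decidable (Spec_gereSucessores inicio vez out) := by unfold Spec_gereSucessores; infer_instance

-- ===== CLAIM (what is proved, stated in full; the proofs are below) =====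
def Claim_equal_gereSucessores : Prop := ∀ (inicio : List (List String)) (vez : String), Dom_gereSucessores inicio vez → Pre_gereSucessores inicio vez → Spec_gereSucessores inicio vez (gereSucessores inicio vez)

-- ===== LEMMAS AND PROOFS =====

-- A's recursive bottom-up scan through rows 0..k-1 of column i equals B's
-- first-index search in the reversed column prefix.
theorem livre_eq_index (mat : List (List String)) (i : Int) (k : Nat) (hk : k ≤ mat.length) :
    livre ((k : Int) - 1) i mat =
      (match PySem.List.index? (((mat.take k).map (fun row => PySem.List.pyGetD row i "")).reverse) " " with
       | some p => (k : Int) - 1 - p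
       | none => -1) := by
  induction k with
  | zero =>
    rw [livre]
    simp [PySem.List.index?_eq_idxOf?]
  | succ k ih =>
    have hklen : k < mat.length := hk
    have h1 : ((k + 1 : Nat) : Int) - 1 = (k : Int) := by push_cast; ring
    rw [h1, livre, if_neg (by omega : ¬ ((k : Int) < 0))]
    have hgetk : PySem.List.pyGetD mat (k : Int) ([] : List String) = mat[k] := by
      simp [List.getD_eq_getElem?_getD, List.getElem?_eq_getElem hklen]
    have htake : mat.take (k+1) = mat.take k ++ [mat[k]] := by
      rw [List.take_add_one, List.getElem?_eq_getElem hklen]; simp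
    rw [hgetk, htake, List.map_append, List.reverse_append]
    simp only [List.map_cons, List.map_nil, List.reverse_singleton, List.singleton_append]
    by_cases hc : PySem.List.pyGetD mat[k] i "" = " "
    · simp [hc, PySem.List.index?_eq_idxOf?, List.idxOf?_cons]
    · rw [if_neg hc, ih (le_of_lt hklen)]
      simp only [PySem.List.index?_eq_idxOf?, List.idxOf?_cons]
      have hne : (PySem.List.pyGetD mat[k] i "" == " ") = false := by
        simpa using hc
      rw [hne]
      simp only [Bool.false_eq_true, if_false]
      cases hr : List.idxOf? " " ((mat.take k).map (fun row => PySem.List.pyGetD row i "")).reverse with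
      | none => simp
      | some p => simp; ring

-- the two ports return the same list for every input (Pre_ marks where the Pythons raise)
theorem ports_agree (inicio : List (List String)) (vez : String) :
    gereSucessores inicio vez = gereSucessores_alt inicio vez := by
  unfold gereSucessores gereSucessores_alt
  apply PySem.List.foldl_congr_mem
  intro acc i hi
  simp only []
  have hnova : inicio.map (fun row => PySem.List.slice row none none) = inicio := by
    simp [PySem.List.slice_none_none]
  rw [hnova]
  have hrev : (PySem.List.slice? (inicio.map (fun row => PySem.List.pyGetD row i "")) none none (-1)).getD []
      = (inicio.map (fun row => PySem.List.pyGetD row i "")).reverse := by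
    rw [PySem.List.slice?_none_none_neg_one]; rfl
  rw [hrev]
  have key := livre_eq_index inicio i inicio.length (le_refl _)
  rw [List.take_length] at key
  unfold primeiraLinhaLivre
  cases hr : PySem.List.index? (inicio.map (fun row => PySem.List.pyGetD row i "")).reverse " " with
  | none =>
    have hmem : " " ∉ inicio.map (fun row => PySem.List.pyGetD row i "") := by
      have := (PySem.List.index?_eq_none_iff _ _).mp hr
      simpa using this
    rw [key, hr]
    simp [hmem]
  | some p =>
    have hp : p < inicio.length := by
      obtain ⟨h, -, -⟩ := List.idxOf?_eq_some_iff.mp (by simpa [PySem.List.index?_eq_idxOf?] using hr)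
      simpa using h
    have hmem : " " ∈ inicio.map (fun row => PySem.List.pyGetD row i "") := by
      have := (PySem.List.index?_isSome_iff _ _).mp (by rw [hr]; rfl)
      simpa using this
    rw [key, hr]
    simp only [hmem, if_true, Option.getD_some]
    rw [if_pos (by omega : (inicio.length : Int) - 1 - (p : Int) ≥ 0)]

-- ===== VERDICT (by name: the statement is the Claim_ definition above) =====
theorem gereSucessores_spec : Claim_equal_gereSucessores := by
  intro inicio vez _ _
  unfold Spec_gereSucessores
  exact ports_agree inicio vez
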